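-- pv_equiv track=rewrite | github.com/sandeep-singh-79/DSAlgo | src/otherAlgoQuestions/lastNonRepeatedChar.py | searchLastNonRepeatedChar
-- ===== SOURCE A (Python) =====
-- from collections import OrderedDict
--
-- def searchLastNonRepeatedChar(string: str) -> str:
--     if string is None or len(string) == 0: return
--     if len(string) == 1: return string
--
--     characters = OrderedDict()
--
--     for ch in string.lower():
--         if ch in characters.keys(): characters[ch] += 1
--         else: characters[ch] = 1
--
--     nonRepeatingChars: OrderedDict = OrderedDict((k, v) for k, v in characters.items() if v == 1)
--     return list(nonRepeatingChars.keys())[-1]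
-- ===== SOURCE B (Python) =====
-- def searchLastNonRepeatedChar(string: str) -> str:
--     if string is None or len(string) == 0: return
--     if len(string) == 1: return string
--
--     s = string.lower()
--     for ch in reversed(s):
--         if s.count(ch) == 1:
--             return ch
-- ===== Notes on version B (the rewrite author's own statement) =====
-- stated objective: alternative
-- what changed: B drops A's frequency dictionaries entirely: it scans the lowered string from the end and returns the first character whose occurrence count in the string (str.count) is 1, an early-return nested-scan with no auxiliary data structure.
-- crash fix: On strings of length >= 2 in which every character repeats case-insensitively, A raises IndexError (indexing [-1] into an empty key list) while B falls off its loop and returns None. — e.g. on searchLastNonRepeatedChar("aabb"): A raises IndexError, B returns none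
import Mathlib
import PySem

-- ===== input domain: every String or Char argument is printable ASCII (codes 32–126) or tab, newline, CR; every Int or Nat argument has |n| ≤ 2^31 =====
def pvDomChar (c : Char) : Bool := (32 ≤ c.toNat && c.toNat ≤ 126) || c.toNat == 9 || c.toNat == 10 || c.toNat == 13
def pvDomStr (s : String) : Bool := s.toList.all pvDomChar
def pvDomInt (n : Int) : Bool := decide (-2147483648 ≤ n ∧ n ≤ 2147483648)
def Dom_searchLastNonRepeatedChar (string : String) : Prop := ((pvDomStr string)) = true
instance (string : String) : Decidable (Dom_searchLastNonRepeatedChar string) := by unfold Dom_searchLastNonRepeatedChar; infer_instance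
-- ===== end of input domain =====

-- B drops A's frequency dictionaries: one early-return scan of the lowered string
-- from the end, testing each character with str.count; objective: alternative.

-- ===== PORT A =====
def searchLastNonRepeatedChar (string : String) : Option String :=
  if PySem.Str.len string == 0 then none
  else if PySem.Str.len string == 1 then some string
  else
    let characters : PySem.Dict Char Int :=
      (PySem.Str.lower string).toList.foldl
        (fun d ch => if d.contains ch then d.insert ch (d.getD ch 0 + 1)
                     else d.insert ch 1)
        PySem.Dict.empty
    let nonRepeatingChars : PySem.Dict Char Int :=
      PySem.Dict.ofList (characters.items.filter (fun kv => kv.2 == (1 : Int)))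
    (PySem.List.pyGet? nonRepeatingChars.keys (-1)).map (fun c => String.ofList [c])

-- ===== PORT B =====
def searchLastNonRepeatedChar_alt (string : String) : Option String :=
  if PySem.Str.len string == 0 then none
  else if PySem.Str.len string == 1 then some string
  else
    let s := (PySem.Str.lower string).toList
    -- 'for ch in reversed(s): if s.count(ch) == 1: return ch' is List.find? on s.reverse
    (s.reverse.find? (fun ch => s.count ch == 1)).map (fun c => String.ofList [c])

-- ===== PRECONDITION & SPEC =====
-- Pre_ excludes the strings of length ≥ 2 in which every character (case-insensitively)
-- repeats: there A's final [-1] indexes an empty list and raises IndexError.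
def Pre_searchLastNonRepeatedChar (string : String) : Prop :=
  string.toList.length ≤ 1 ∨
    ((PySem.Str.lower string).toList.any
      (fun c => (PySem.Str.lower string).toList.count c == 1)) = true
instance (string : String) : Decidable (Pre_searchLastNonRepeatedChar string) := by
  unfold Pre_searchLastNonRepeatedChar; infer_instance

def pvWitness_searchLastNonRepeatedChar : String := "aabc"

-- On strings of length ≥ 2 in which every character repeats case-insensitively,
-- A raises IndexError while B falls off its loop and returns None.
def Raises_searchLastNonRepeatedChar (string : String) : Prop :=
  2 ≤ string.toList.length ∧
    ((PySem.Str.lower string).toList.any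
      (fun c => (PySem.Str.lower string).toList.count c == 1)) = false
instance (string : String) : Decidable (Raises_searchLastNonRepeatedChar string) := by
  unfold Raises_searchLastNonRepeatedChar; infer_instance

def pvRaiseWitness_searchLastNonRepeatedChar : String := "aabb"
def pvRaiseWitnessOut_searchLastNonRepeatedChar : Option String := none

def Spec_searchLastNonRepeatedChar (string : String) (out : Option String) : Prop :=
  out = searchLastNonRepeatedChar_alt string
instance (string : String) (out : Option String) :
    Decidable (Spec_searchLastNonRepeatedChar string out) := by
  unfold Spec_searchLastNonRepeatedChar; infer_instance

-- ===== CLAIM (what is proved, stated in full; the proofs are below) =====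
def Claim_equal_searchLastNonRepeatedChar : Prop :=
  ∀ (string : String), Dom_searchLastNonRepeatedChar string →
    Pre_searchLastNonRepeatedChar string →
    Spec_searchLastNonRepeatedChar string (searchLastNonRepeatedChar string)

def Claim_raises_searchLastNonRepeatedChar : Prop :=
  (∀ (string : String), Dom_searchLastNonRepeatedChar string →
      Raises_searchLastNonRepeatedChar string → ¬ Pre_searchLastNonRepeatedChar string) ∧
  (Dom_searchLastNonRepeatedChar (pvRaiseWitness_searchLastNonRepeatedChar) ∧
    Raises_searchLastNonRepeatedChar (pvRaiseWitness_searchLastNonRepeatedChar) ∧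
    searchLastNonRepeatedChar_alt (pvRaiseWitness_searchLastNonRepeatedChar)
      = pvRaiseWitnessOut_searchLastNonRepeatedChar)

-- ===== LEMMAS AND PROOFS =====

-- A's counting loop is collections.Counter of the lowered characters.
theorem count_loop_eq_counter (l : List Char) :
    l.foldl (fun d ch => if d.contains ch then d.insert ch (d.getD ch 0 + 1)
                         else d.insert ch 1) PySem.Dict.empty
      = PySem.Dict.counter l := by
  rw [← PySem.Dict.foldl_insert_getD_add_one_eq_counter]
  apply PySem.List.foldl_congr_mem
  intro d x _
  by_cases h : d.contains x = true
  · rw [if_pos h]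
  · simp only [Bool.not_eq_true] at h
    rw [if_neg (by simp [h]), PySem.Dict.getD_of_not_contains d 0 h]
    norm_num

theorem ofList_sublist_aux {α : Type} [BEq α] (l s t : List α) (h : s.Sublist t) :
    (l.foldl PySem.Set.add s).Sublist (t ++ l) := by
  induction l generalizing s t with
  | nil => simpa using h
  | cons x l ih =>
    have hstep : (PySem.Set.add s x).Sublist (t ++ [x]) := by
      unfold PySem.Set.add
      by_cases hc : PySem.Set.contains s x = true
      · rw [if_pos hc]
        exact h.trans (List.sublist_append_left t [x])
      · rw [if_neg hc]
        exact h.append (List.Sublist.refl [x])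
    simpa [List.append_assoc] using ih (PySem.Set.add s x) (t ++ [x]) hstep

theorem ofList_sublist {α : Type} [BEq α] (l : List α) :
    (PySem.Set.ofList l).Sublist l := by
  simpa using ofList_sublist_aux l [] [] (List.Sublist.refl [])

-- the unique (count-1) characters of l in first-occurrence order ARE exactly
-- their occurrences in l, in order
theorem dedup_filter_count_one (l : List Char) :
    (PySem.Set.ofList l).filter (fun c => l.count c == 1)
      = l.filter (fun c => l.count c == 1) := by
  have hsub : ((PySem.Set.ofList l).filter (fun c => l.count c == 1)).Sublist
      (l.filter (fun c => l.count c == 1)) :=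
    (ofList_sublist l).filter _
  have hnd1 : ((PySem.Set.ofList l).filter (fun c => l.count c == 1)).Nodup :=
    (PySem.Set.nodup_ofList l).filter _
  have hnd2 : (l.filter (fun c => l.count c == 1)).Nodup := by
    rw [List.nodup_iff_count_le_one]
    intro a
    by_cases hm : a ∈ l.filter (fun c => l.count c == 1)
    · have h1 : l.count a = 1 := by
        have := (List.mem_filter.mp hm).2
        simpa using this
      calc (l.filter (fun c => l.count c == 1)).count a
          ≤ l.count a := List.Sublist.count_le a List.filter_sublist
        _ = 1 := h1
    · simp [List.count_eq_zero.mpr hm]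
  have hlen : ((PySem.Set.ofList l).filter (fun c => l.count c == 1)).length
      = (l.filter (fun c => l.count c == 1)).length := by
    rw [← List.toFinset_card_of_nodup hnd1, ← List.toFinset_card_of_nodup hnd2]
    congr 1
    ext c
    simp [PySem.Set.mem_ofList]
  exact hsub.eq_of_length hlen

-- the key list A extracts from its second OrderedDict is the count-1 filter of l
theorem keysA_eq_filter (l : List Char) :
    (PySem.Dict.ofList ((PySem.Dict.counter l).items.filter
        (fun kv => kv.2 == (1 : Int)))).keys
      = l.filter (fun c => l.count c == 1) := by
  have hpairs : (PySem.Dict.counter l).items.filter (fun kv => kv.2 == (1 : Int))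
      = ((PySem.Set.ofList l).filter (fun c => l.count c == 1)).map
          (fun k => (k, (l.count k : Int))) := by
    rw [PySem.Dict.items_counter, List.filter_map]
    congr 1
    apply List.filter_congr
    intro c _
    simp [Function.comp]
  have hnodup : ((((PySem.Set.ofList l).filter (fun c => l.count c == 1)).map
      (fun k => (k, (l.count k : Int)))).map Prod.fst).Nodup := by
    have he : ((((PySem.Set.ofList l).filter (fun c => l.count c == 1)).map
        (fun k => (k, (l.count k : Int)))).map Prod.fst)
        = (PySem.Set.ofList l).filter (fun c => l.count c == 1) := by
      rw [List.map_map]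
      simp [Function.comp_def]
    rw [he]
    exact (PySem.Set.nodup_ofList l).filter _
  rw [hpairs]
  unfold PySem.Dict.ofList PySem.Dict.update
  have hitems := PySem.Dict.items_foldl_insert_fresh
    (((PySem.Set.ofList l).filter (fun c => l.count c == 1)).map
      (fun k => (k, (l.count k : Int))))
    Prod.fst Prod.snd PySem.Dict.empty
    (by intro a _; simp [PySem.Dict.contains_empty])
    hnodup
  rw [show (PySem.Dict.keys = fun (d : PySem.Dict Char Int) => d.items.map Prod.fst) from rfl]
  simp only [hitems]
  rw [dedup_filter_count_one] at *
  simp [List.map_map, Function.comp_def, PySem.Dict.empty]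

-- B's early-return reversed scan is the head of the reversed count-1 filter
theorem find?_reverse_eq_getLast?_filter (l : List Char) (p : Char → Bool) :
    l.reverse.find? p = (l.filter p).getLast? := by
  rw [← List.head?_filter, List.filter_reverse, List.head?_reverse]

-- ===== VERDICT (by name: the statement is the Claim_ definition above) =====
theorem searchLastNonRepeatedChar_spec : Claim_equal_searchLastNonRepeatedChar := by
  intro string _ _
  unfold Spec_searchLastNonRepeatedChar
  simp only [searchLastNonRepeatedChar, searchLastNonRepeatedChar_alt]
  by_cases h0 : (PySem.Str.len string == 0) = true
  · rw [if_pos h0, if_pos h0]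
  · by_cases h1 : (PySem.Str.len string == 1) = true
    · rw [if_neg h0, if_pos h1, if_neg h0, if_pos h1]
    · rw [if_neg h0, if_neg h0, if_neg h1, if_neg h1]
      rw [count_loop_eq_counter, keysA_eq_filter, PySem.List.pyGet?_neg_one,
        find?_reverse_eq_getLast?_filter]

@[simp] theorem searchLastNonRepeatedChar_raises : Claim_raises_searchLastNonRepeatedChar := by
  unfold Claim_raises_searchLastNonRepeatedChar
  refine ⟨?_, by decide⟩
  intro string _ hr hpre
  obtain ⟨h2, hall⟩ := hr
  rcases hpre with h | h
  · omega
  · rw [hall] at h; exact Bool.false_ne_true h
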